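-- pv_equiv track=rewrite | github.com/TisoneK/scrapamoja | src/sites/wikipedia/extraction/link_processor.py | _parse_image_metadata
-- ===== SOURCE A (Python) =====
-- from typing import Dict, Any, List, Optional, Tuple
--
-- def _parse_image_metadata(metadata: str) -> Dict[str, Any]:
--     """Parse image metadata from wiki markup."""
--     if not metadata:
--         return {}
--
--     parsed = {}
--     parts = metadata.split('|')
--
--     for part in parts:
--         part = part.strip()
--         if '=' in part:
--             key, value = part.split('=', 1)
--             parsed[key.strip()] = value.strip()
--         else:
--             # Likely the caption
--             if 'caption' not in parsed:
--                 parsed['caption'] = part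
--
--     return parsed
-- ===== SOURCE B (Python) =====
-- def _normalize(parts, has_caption=False):
--     """Recursively turn the raw pipe-separated parts into an ordered (key, value) pair stream:
--     'k=v' parts become (k, v); the first bare part (before any caption key) becomes ('caption', part)."""
--     if not parts:
--         return []
--     part = parts[0].strip()
--     rest = parts[1:]
--     if '=' in part:
--         key, value = part.split('=', 1)
--         k = key.strip()
--         return [(k, value.strip())] + _normalize(rest, ('caption' == k) or has_caption)
--     if has_caption:
--         return _normalize(rest, has_caption)
--     return [('caption', part)] + _normalize(rest, True)
--
-- def _parse_image_metadata(metadata: str):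
--     """Parse image metadata from wiki markup."""
--     if not metadata:
--         return {}
--     parsed = {}
--     for k, v in _normalize(metadata.split('|')):
--         parsed[k] = v
--     return parsed
-- ===== Notes on version B (the rewrite author's own statement) =====
-- stated objective: alternative
-- what changed: A's single loop that mutates the dict in place (with a membership test deciding bare captions) is replaced by a two-phase decomposition: a recursive normalization of the pipe-separated parts into an ordered (key, value) pair stream, followed by a plain dict-building loop over the pairs.
import Mathlib
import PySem

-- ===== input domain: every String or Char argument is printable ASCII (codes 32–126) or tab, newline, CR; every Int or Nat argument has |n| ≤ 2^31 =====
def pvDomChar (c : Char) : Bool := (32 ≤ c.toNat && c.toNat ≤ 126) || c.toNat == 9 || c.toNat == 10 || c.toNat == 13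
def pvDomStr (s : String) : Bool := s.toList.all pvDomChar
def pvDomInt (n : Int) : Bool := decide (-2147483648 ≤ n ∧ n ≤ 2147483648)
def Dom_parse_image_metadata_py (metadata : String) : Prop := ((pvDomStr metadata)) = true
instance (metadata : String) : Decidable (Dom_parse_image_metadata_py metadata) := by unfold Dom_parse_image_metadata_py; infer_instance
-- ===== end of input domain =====

-- B replaces A's single loop mutating the dict with a two-phase decomposition: a recursive
-- normalization of the parts into an ordered (key, value) pair stream, then a plain dict-build fold.

-- ===== PORT A =====
def pyAStep (parsed : PySem.Dict String String) (rawPart : String) : PySem.Dict String String :=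
  let part := PySem.Str.strip rawPart
  if PySem.Str.isIn "=" part then
    match PySem.Str.splitMax? part "=" 1 with
    | some (key :: value :: _) => parsed.insert (PySem.Str.strip key) (PySem.Str.strip value)
    | _ => parsed
  else if parsed.contains "caption" then parsed
  else parsed.insert "caption" part

def parse_image_metadata_py (metadata : String) : List (String × String) :=
  if metadata = "" then []
  else (((PySem.Str.split? metadata "|").getD []).foldl pyAStep PySem.Dict.empty).items

-- ===== PORT B =====
def pyBNormalize (parts : List String) (hasCaption : Bool) : List (String × String) :=
  match parts with
  | [] => []
  | raw :: rest =>
    let part := PySem.Str.strip raw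
    if PySem.Str.isIn "=" part then
      match PySem.Str.splitMax? part "=" 1 with
      | some (key :: value :: _) =>
        let k := PySem.Str.strip key
        (k, PySem.Str.strip value) :: pyBNormalize rest (("caption" == k) || hasCaption)
      | _ => pyBNormalize rest hasCaption
    else if hasCaption then pyBNormalize rest hasCaption
    else ("caption", part) :: pyBNormalize rest true

def parse_image_metadata_py_alt (metadata : String) : List (String × String) :=
  if metadata = "" then []
  else
    ((pyBNormalize ((PySem.Str.split? metadata "|").getD []) false).foldl
      (fun parsed p => parsed.insert p.1 p.2) PySem.Dict.empty).items


-- ===== PRECONDITION & SPEC =====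
def Spec_parse_image_metadata_py (metadata : String) (out : List (String × String)) : Prop := out = parse_image_metadata_py_alt metadata
instance (metadata : String) (out : List (String × String)) : Decidable (Spec_parse_image_metadata_py metadata out) := by unfold Spec_parse_image_metadata_py; infer_instance

-- ===== CLAIM (what is proved, stated in full; the proofs are below) =====
def Claim_equal_parse_image_metadata_py : Prop := ∀ (metadata : String), Dom_parse_image_metadata_py metadata → Spec_parse_image_metadata_py metadata (parse_image_metadata_py metadata)


-- ===== LEMMAS AND PROOFS =====
-- A's loop equals B's normalize-then-insert fold, for any starting dict d whose caption flag matches.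
theorem pyAB_foldl_eq (parts : List String) (d : PySem.Dict String String) :
    parts.foldl pyAStep d
      = (pyBNormalize parts (d.contains "caption")).foldl
          (fun parsed p => parsed.insert p.1 p.2) d := by
  induction parts generalizing d with
  | nil => rfl
  | cons raw rest ih =>
    rw [List.foldl_cons]
    simp only [pyAStep, pyBNormalize]
    generalize PySem.Str.strip raw = part
    generalize PySem.Str.splitMax? part "=" 1 = r
    cases h : PySem.Str.isIn "=" part with
    | true =>
      simp only [reduceIte]
      cases r with
      | none => exact ih d
      | some l =>
        cases l with
        | nil => exact ih d
        | cons key l1 =>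
          cases l1 with
          | nil => exact ih d
          | cons value t =>
            simp only [List.foldl_cons]
            rw [ih, PySem.Dict.contains_insert]
    | false =>
      simp only [Bool.false_eq_true, reduceIte]
      cases hc : d.contains "caption" with
      | true => simp only [reduceIte]; rw [ih, hc]
      | false =>
        simp only [Bool.false_eq_true, reduceIte, List.foldl_cons]
        rw [ih]
        simp

-- ===== VERDICT (by name: the statement is the Claim_ definition above) =====
theorem parse_image_metadata_py_spec : Claim_equal_parse_image_metadata_py := by
  intro metadata _
  unfold Spec_parse_image_metadata_py parse_image_metadata_py parse_image_metadata_py_alt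
  by_cases h : metadata = ""
  · simp [h]
  · simp only [h, if_false]
    rw [pyAB_foldl_eq]
    rfl
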